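-- pv_equiv track=rewrite | github.com/ethanfurman/openerp_fis_integration | scripts/fnx_script_support.py | which_days
-- ===== SOURCE A (Python) =====
-- def which_days(text):
--     week = ['su','mo','tu','we','th','fr','sa']
--     text = text.lower()
--     groups = text.split(',')
--     days = []
--     for group in groups:
--         if '-' not in group:
--             days.append(group)
--         else:
--             start, stop = group.split('-')
--             if start not in week:
--                 raise ValueError('invalid start day: %r' % (start, ))
--             if stop not in week:
--                 raise ValueError('invalid stop day: %r' % (stop, ))
--             start = week.index(start)
--             while True:
--                 days.append(week[start])
--                 if week[start] == stop:
--                     break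
--                 start = (start + 1) % 7
--     return days
-- ===== SOURCE B (Python) =====
-- def which_days(text):
--     week = ['su','mo','tu','we','th','fr','sa']
--     days = []
--     for group in text.lower().split(','):
--         if '-' not in group:
--             days.append(group)
--         else:
--             start, stop = group.split('-')
--             if start not in week:
--                 raise ValueError('invalid start day: %r' % (start, ))
--             if stop not in week:
--                 raise ValueError('invalid stop day: %r' % (stop, ))
--             i = week.index(start)
--             count = (week.index(stop) - i) % 7 + 1
--             days.extend((week + week)[i:i + count])
--     return days
-- ===== Notes on version B (the rewrite author's own statement) =====
-- stated objective: simpler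
-- what changed: A walks the week circularly with a while-True/break loop appending one day per iteration; B computes the span in closed form, count = (week.index(stop) - week.index(start)) % 7 + 1, and extends days with one slice of week + week.
import Mathlib
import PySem

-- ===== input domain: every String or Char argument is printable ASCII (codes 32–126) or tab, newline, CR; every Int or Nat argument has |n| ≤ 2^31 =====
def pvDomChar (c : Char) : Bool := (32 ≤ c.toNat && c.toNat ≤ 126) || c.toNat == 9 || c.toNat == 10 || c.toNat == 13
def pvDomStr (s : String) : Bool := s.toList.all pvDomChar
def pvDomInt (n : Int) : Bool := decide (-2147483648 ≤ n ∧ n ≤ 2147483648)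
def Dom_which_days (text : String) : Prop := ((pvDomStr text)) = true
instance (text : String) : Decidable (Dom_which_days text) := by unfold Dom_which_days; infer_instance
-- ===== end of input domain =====

-- B replaces A's circular while-walk over the week by a closed-form count and one slice of week ++ week; objective: simpler.

-- ===== PORT A =====
def pvWeek : List String := ["su", "mo", "tu", "we", "th", "fr", "sa"]

-- A's 'while True' walk: it breaks within 7 steps whenever stop ∈ pvWeek (which A's
-- validation guarantees), so fuel 7 is exact on every admitted input.
def pvLoopA : Nat → Nat → String → List String → List String
  | 0, _, _, days => days
  | fuel + 1, start, stop, days =>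
    let days := days ++ [pvWeek.getD start ""]          -- days.append(week[start]); start < 7 always
    if pvWeek.getD start "" == stop then days
    else pvLoopA fuel ((start + 1) % 7) stop days

def which_days (text : String) : List String :=
  let text := PySem.Str.lower text
  let groups := (PySem.Str.split? text ",").getD []      -- sep "," ≠ "" so never none
  groups.foldl
    (fun days group =>
      if ¬ (PySem.Str.isIn "-" group = true) then days ++ [group]
      else
        match (PySem.Str.split? group "-").getD [] with
        | [start, stop] =>
          if ¬ (start ∈ pvWeek) then days                -- raise ValueError: outside Pre_
          else if ¬ (stop ∈ pvWeek) then days            -- raise ValueError: outside Pre_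
          else pvLoopA 7 ((PySem.List.index? pvWeek start).getD 0) stop days
        | _ => days)                                     -- unpacking raises: outside Pre_
    []

-- ===== PORT B =====
def pvWeekB : List String := ["su", "mo", "tu", "we", "th", "fr", "sa"]
def which_days_alt (text : String) : List String :=
  ((PySem.Str.split? (PySem.Str.lower text) ",").getD []).foldl
    (fun days group =>
      if ¬ (PySem.Str.isIn "-" group = true) then days ++ [group]
      else
        let ps := (PySem.Str.split? group "-").getD []
        if ps.length ≠ 2 then days                       -- unpacking raises: outside Pre_
        else
          let start := ps.getD 0 ""
          let stop := ps.getD 1 ""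
          if ¬ (start ∈ pvWeekB) then days               -- raise ValueError: outside Pre_
          else if ¬ (stop ∈ pvWeekB) then days           -- raise ValueError: outside Pre_
          else
            let i : Nat := (PySem.List.index? pvWeekB start).getD 0
            let count : Nat :=
              (PySem.Int.mod (((PySem.List.index? pvWeekB stop).getD 0 : Int) - (i : Int)) 7 + 1).toNat
            days ++ PySem.List.slice (pvWeekB ++ pvWeekB) (some (i : Int)) (some ((i : Int) + (count : Int))))
    []

-- ===== PRECONDITION & SPEC =====
-- Pre_ excludes exactly the inputs where A raises ValueError: a comma-group containing '-'
-- must split into exactly two parts, both of which are week-day names.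
def Pre_which_days (text : String) : Prop :=
  ∀ g ∈ (PySem.Str.split? (PySem.Str.lower text) ",").getD [],
    PySem.Str.isIn "-" g = true →
      let ps := (PySem.Str.split? g "-").getD []
      ps.length = 2 ∧ ps.getD 0 "" ∈ pvWeekB ∧ ps.getD 1 "" ∈ pvWeekB
instance (text : String) : Decidable (Pre_which_days text) := by unfold Pre_which_days; infer_instance

def pvWitness_which_days : String := "mo,Fr-Su,x"

def Spec_which_days (text : String) (out : List String) : Prop := out = which_days_alt text
instance (text : String) (out : List String) : Decidable (Spec_which_days text out) := by unfold Spec_which_days; infer_instance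

-- ===== CLAIM (what is proved, stated in full; the proofs are below) =====
def Claim_equal_which_days : Prop := ∀ (text : String), Dom_which_days text → Pre_which_days text → Spec_which_days text (which_days text)

-- ===== LEMMAS AND PROOFS =====

-- A's loop only appends to its accumulator.
theorem pvLoopA_append (fuel start : Nat) (stop : String) (days : List String) :
    pvLoopA fuel start stop days = days ++ pvLoopA fuel start stop [] := by
  induction fuel generalizing start days with
  | zero => simp [pvLoopA]
  | succ n ih =>
    simp only [pvLoopA, List.nil_append]
    split
    · rfl
    · rw [ih, ih ((start + 1) % 7) [pvWeek.getD start ""], List.append_assoc]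

-- for validated start/stop the while-walk equals B's closed-form slice (49 concrete cases)
theorem pvLoop_eq_slice : ∀ s ∈ pvWeekB, ∀ t ∈ pvWeekB,
    pvLoopA 7 ((PySem.List.index? pvWeek s).getD 0) t [] =
      PySem.List.slice (pvWeekB ++ pvWeekB) (some (((PySem.List.index? pvWeekB s).getD 0 : Nat) : Int))
        (some ((((PySem.List.index? pvWeekB s).getD 0 : Nat) : Int) +
          (((PySem.Int.mod (((PySem.List.index? pvWeekB t).getD 0 : Int) -
              ((PySem.List.index? pvWeekB s).getD 0 : Int)) 7 + 1).toNat : Nat) : Int))) := by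
  decide

theorem which_days_spec : Claim_equal_which_days := by
  intro text _hdom hpre
  unfold Spec_which_days which_days which_days_alt
  apply PySem.List.foldl_congr_mem
  intro days g hg
  by_cases hd : PySem.Str.isIn "-" g = true
  · obtain ⟨hlen, h0, h1⟩ := hpre g hg hd
    obtain ⟨s, t, hps⟩ : ∃ s t, (PySem.Str.split? g "-").getD [] = [s, t] := by
      match h' : (PySem.Str.split? g "-").getD [] with
      | [s, t] => exact ⟨s, t, rfl⟩
      | [] => rw [h'] at hlen; simp at hlen
      | [_] => rw [h'] at hlen; simp at hlen
      | _ :: _ :: _ :: _ => rw [h'] at hlen; simp at hlen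
    rw [hps] at h0 h1
    simp only [List.getD_cons_zero, List.getD_cons_succ] at h0 h1
    have h0a : s ∈ pvWeek := h0
    have h1a : t ∈ pvWeek := h1
    simp only [hd, hps, h0a, h1a, not_true, ite_false]
    rw [pvLoopA_append, pvLoop_eq_slice s h0 t h1]
    simp [h0, h1]
  · have hd' : PySem.Chars.isIn ['-'] g.toList = false := by simpa using hd
    simp [hd']
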